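-- pv_equiv track=rewrite | github.com/pasqualedem/VISTA | vista/utils/utils.py | hierarchical_uniform_sampling
-- ===== SOURCE A (Python) =====
-- def hierarchical_uniform_sampling(N, M):
--     selected_numbers = [0, N]  # Start with the base case M=2
--
--     if M == 1:
--         return [0]  # Return a single point if M=1
--
--     while len(selected_numbers) < M:
--         new_numbers = []
--         prev_list = selected_numbers[:]
--
--         for i in range(len(prev_list) - 1):
--             midpoint = (prev_list[i] + prev_list[i + 1]) // 2
--             if midpoint not in selected_numbers:
--                 new_numbers.append(midpoint)
--             if len(selected_numbers) + len(new_numbers) >= M: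
--                 break
--
--         if not new_numbers:
--             break  # Prevent infinite loop if no new numbers can be added
--
--         selected_numbers.extend(new_numbers)
--         selected_numbers.sort()
--
--     return selected_numbers[:M]  # Ensure exactly M numbers
-- ===== SOURCE B (Python) =====
-- from collections import deque
--
--
-- def hierarchical_uniform_sampling(N, M):
--     if M == 1:
--         return [0]
--     result = [0, N]
--     queue = deque([(min(0, N), max(0, N))])
--     while queue and len(result) < M:
--         lo, hi = queue.popleft()
--         if hi - lo >= 2:
--             mid = (lo + hi) // 2
--             result.append(mid)
--             queue.append((lo, mid))
--             queue.append((mid, hi))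
--     result.sort()
--     return result[:M]
-- ===== Notes on version B (the rewrite author's own statement) =====
-- stated objective: faster
-- what changed: Replaces A's level-by-level rebuild (copy the list, scan consecutive pairs with an O(n) 'midpoint not in selected' membership test, extend and re-sort every level) by a FIFO queue of (lo,hi) intervals seeded with (min(0,N),max(0,N)): each popped interval with gap>=2 emits its midpoint and enqueues its two halves, and the result is sorted once at the end.
-- intended difference: On N<0 with M=2, M=-1, or N=-1 with M>=3, A's sort never runs and it returns a slice of the unsorted seed [0,N] (e.g. A(-5,2)=[0,-5], A(-1,5)=[0,-1]); B returns the sorted sample ([-5,0], [-1,0]), which is the intended ascending output the function produces everywhere else. — e.g. on hierarchical_uniform_sampling(-5, 2): A returns [0, -5], B returns [-5, 0]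
import Mathlib
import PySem

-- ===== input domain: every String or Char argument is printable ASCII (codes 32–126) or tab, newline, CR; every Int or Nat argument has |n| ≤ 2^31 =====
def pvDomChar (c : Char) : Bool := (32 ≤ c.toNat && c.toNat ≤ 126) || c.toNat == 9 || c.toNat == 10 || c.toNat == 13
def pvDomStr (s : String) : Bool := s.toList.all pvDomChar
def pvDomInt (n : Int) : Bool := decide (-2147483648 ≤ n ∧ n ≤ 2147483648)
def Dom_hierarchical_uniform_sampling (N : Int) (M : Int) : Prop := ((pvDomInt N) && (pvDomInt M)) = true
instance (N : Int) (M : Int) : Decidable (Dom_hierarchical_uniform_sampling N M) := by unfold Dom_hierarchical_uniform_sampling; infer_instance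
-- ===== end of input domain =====

-- B replaces A's level-by-level rebuild (pair scan + list membership + re-sort per level) by a
-- FIFO interval queue emitting midpoints, sorted once at the end (measured faster); on a few
-- negative-N corners (D_ below) A returns a slice of the UNSORTED seed [0,N] and B returns the
-- intended sorted sample.


-- ===== PORT A =====
-- inner 'for i in range(len(prev_list)-1)' loop: walks consecutive pairs, appends fresh
-- midpoints, breaks as soon as len(selected)+len(new) >= M
def pvAInner (selected : List Int) (M : Int) : List (Int × Int) → List Int → List Int
  | [], newNumbers => newNumbers
  | (a, b) :: rest, newNumbers =>
    let midpoint := PySem.Int.floordiv (a + b) 2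
    let newNumbers' := if midpoint ∈ selected then newNumbers else newNumbers ++ [midpoint]
    if (selected.length : Int) + newNumbers'.length ≥ M then newNumbers'
    else pvAInner selected M rest newNumbers'

-- the 'while len(selected_numbers) < M' loop: one level per iteration, extend + sort
def pvALoop (M : Int) (selected : List Int) : List Int :=
  if h : (selected.length : Int) < M then
    if hn : pvAInner selected M (selected.zip selected.tail) [] = [] then selected
    else
      pvALoop M (PySem.List.sorted
        (selected ++ pvAInner selected M (selected.zip selected.tail) []) (fun x => x) false)
  else selected
termination_by (M - selected.length).toNat
decreasing_by
  have hl : 1 ≤ (pvAInner selected M (selected.zip selected.tail) []).length :=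
    List.length_pos_iff.mpr hn
  simp only [PySem.List.length_sorted, List.length_append]
  omega

def hierarchical_uniform_sampling (N : Int) (M : Int) : List Int :=
  let selected := [0, N]
  if M = 1 then [0]
  else PySem.List.slice (pvALoop M selected) none (some M)

-- ===== PORT B =====
-- fact used only by pvBLoop's termination measure (a split strictly shrinks ∑ 3^gap)
theorem pv_pow3_split {a b g : Nat} (h : a + b = g) (ha : 1 ≤ a) (hb : 1 ≤ b) :
    3 ^ a + 3 ^ b < 3 ^ g := by
  have h1 : 3 ^ a ≤ 3 ^ (g - 1) := Nat.pow_le_pow_right (by norm_num) (by omega)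
  have h2 : 3 ^ b ≤ 3 ^ (g - 1) := Nat.pow_le_pow_right (by norm_num) (by omega)
  have h3 : 3 ^ g = 3 ^ (g - 1) * 3 := by
    rw [← pow_succ]; congr 1; omega
  have h4 : 1 ≤ 3 ^ (g - 1) := Nat.one_le_pow _ _ (by norm_num)
  omega

-- the 'while queue and len(result) < M' loop: pop leftmost interval, emit midpoint, enqueue halves
def pvBLoop (M : Int) : List (Int × Int) → List Int → List Int
  | [], result => result
  | (lo, hi) :: rest, result =>
    if (result.length : Int) < M then
      if hi - lo ≥ 2 then
        pvBLoop M (rest ++ [(lo, PySem.Int.floordiv (lo + hi) 2),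
                            (PySem.Int.floordiv (lo + hi) 2, hi)])
          (result ++ [PySem.Int.floordiv (lo + hi) 2])
      else pvBLoop M rest result
    else result
termination_by q _ => (q.map (fun p => 3 ^ (p.2 - p.1).toNat)).sum
decreasing_by
  · rename_i hlen hgap
    simp only [List.map_append, List.sum_append, List.map_cons, List.sum_cons, List.map_nil,
      List.sum_nil]
    have hfd : PySem.Int.floordiv (lo + hi) 2 = (lo + hi) / 2 :=
      PySem.Int.floordiv_eq_ediv_of_pos (by norm_num)
    rw [hfd]
    have hb1 : 1 ≤ ((lo + hi) / 2 - lo).toNat := by omega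
    have hb2 : 1 ≤ (hi - (lo + hi) / 2).toNat := by omega
    have hsum : ((lo + hi) / 2 - lo).toNat + (hi - (lo + hi) / 2).toNat = (hi - lo).toNat := by
      omega
    have := pv_pow3_split hsum hb1 hb2
    omega
  · rename_i hlen hgap
    simp only [List.map_cons, List.sum_cons]
    have : 1 ≤ 3 ^ (hi - lo).toNat := Nat.one_le_pow _ _ (by norm_num)
    omega

def hierarchical_uniform_sampling_alt (N : Int) (M : Int) : List Int :=
  if M = 1 then [0]
  else
    PySem.List.slice
      (PySem.List.sorted (pvBLoop M [(min 0 N, max 0 N)] [0, N]) (fun x => x) false)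
      none (some M)

-- ===== PRECONDITION & SPEC =====
-- On N<0 with M=2, M=-1, or N=-1 with M>=3, A's sort never runs and it returns a slice of the
-- unsorted seed [0,N]; B returns the sorted sample, the intended ascending output.
def D_hierarchical_uniform_sampling (N : Int) (M : Int) : Prop :=
  N < 0 ∧ (M = 2 ∨ M = -1 ∨ (N = -1 ∧ 3 ≤ M))
instance (N : Int) (M : Int) : Decidable (D_hierarchical_uniform_sampling N M) := by
  unfold D_hierarchical_uniform_sampling; infer_instance

def Spec_hierarchical_uniform_sampling (N : Int) (M : Int) (out : List Int) : Prop :=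
  ¬ D_hierarchical_uniform_sampling N M → out = hierarchical_uniform_sampling_alt N M
instance (N : Int) (M : Int) (out : List Int) :
    Decidable (Spec_hierarchical_uniform_sampling N M out) := by
  unfold Spec_hierarchical_uniform_sampling; infer_instance

def pvDiffWitness_hierarchical_uniform_sampling : Int × Int := (-5, 2)
def pvDiffWitnessOut_hierarchical_uniform_sampling : (List Int) × (List Int) :=
  ([0, -5], [-5, 0])

-- ===== CLAIM (what is proved, stated in full; the proofs are below) =====
def Claim_unchanged_hierarchical_uniform_sampling : Prop := ∀ (N : Int) (M : Int), Dom_hierarchical_uniform_sampling N M → Spec_hierarchical_uniform_sampling N M (hierarchical_uniform_sampling N M)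
def Claim_changed_hierarchical_uniform_sampling : Prop := Dom_hierarchical_uniform_sampling (pvDiffWitness_hierarchical_uniform_sampling.1) (pvDiffWitness_hierarchical_uniform_sampling.2) ∧ D_hierarchical_uniform_sampling (pvDiffWitness_hierarchical_uniform_sampling.1) (pvDiffWitness_hierarchical_uniform_sampling.2) ∧ hierarchical_uniform_sampling (pvDiffWitness_hierarchical_uniform_sampling.1) (pvDiffWitness_hierarchical_uniform_sampling.2) = pvDiffWitnessOut_hierarchical_uniform_sampling.1 ∧ hierarchical_uniform_sampling_alt (pvDiffWitness_hierarchical_uniform_sampling.1) (pvDiffWitness_hierarchical_uniform_sampling.2) = pvDiffWitnessOut_hierarchical_uniform_sampling.2 ∧ pvDiffWitnessOut_hierarchical_uniform_sampling.1 ≠ pvDiffWitnessOut_hierarchical_uniform_sampling.2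
def Claim_exact_hierarchical_uniform_sampling : Prop := ∀ (N : Int) (M : Int), Dom_hierarchical_uniform_sampling N M → D_hierarchical_uniform_sampling N M → hierarchical_uniform_sampling N M ≠ hierarchical_uniform_sampling_alt N M

-- ===== LEMMAS AND PROOFS =====

-- abbreviations used only by the proofs
def pvMid (lo hi : Int) : Int := PySem.Int.floordiv (lo + hi) 2
def pvSort (xs : List Int) : List Int := PySem.List.sorted xs (fun x => x) false
def pvTake (n : Int) (xs : List Int) : List Int := xs.take n.toNat
def pvPairs (s : List Int) : List (Int × Int) := s.zip s.tail

-- the full BFS midpoint stream of an interval queue (no M cut-off)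
def pvStream : List (Int × Int) → List Int
  | [] => []
  | (lo, hi) :: rest =>
    if hi - lo ≥ 2 then
      pvMid lo hi :: pvStream (rest ++ [(lo, pvMid lo hi), (pvMid lo hi, hi)])
    else pvStream rest
termination_by q => (q.map (fun p => 3 ^ (p.2 - p.1).toNat)).sum
decreasing_by
  · rename_i hgap
    simp only [List.map_append, List.sum_append, List.map_cons, List.sum_cons, List.map_nil,
      List.sum_nil]
    have hfd : pvMid lo hi = (lo + hi) / 2 := PySem.Int.floordiv_eq_ediv_of_pos (by norm_num)
    rw [hfd]
    have hb1 : 1 ≤ ((lo + hi) / 2 - lo).toNat := by omega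
    have hb2 : 1 ≤ (hi - (lo + hi) / 2).toNat := by omega
    have hsum : ((lo + hi) / 2 - lo).toNat + (hi - (lo + hi) / 2).toNat = (hi - lo).toNat := by
      omega
    have := pv_pow3_split hsum hb1 hb2
    omega
  · rename_i hgap
    simp only [List.map_cons, List.sum_cons]
    have : 1 ≤ 3 ^ (hi - lo).toNat := Nat.one_le_pow _ _ (by norm_num)
    omega

-- one level of the stream: the midpoints emitted by the current queue, and the next queue
def pvHeads (q : List (Int × Int)) : List Int :=
  q.filterMap (fun p => if p.2 - p.1 ≥ 2 then some (pvMid p.1 p.2) else none)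
def pvKids (q : List (Int × Int)) : List (Int × Int) :=
  q.flatMap (fun p => if p.2 - p.1 ≥ 2 then [(p.1, pvMid p.1 p.2), (pvMid p.1 p.2, p.2)] else [])
def pvExpand (q : List (Int × Int)) : List (Int × Int) :=
  q.flatMap (fun p => if p.2 - p.1 ≥ 2 then [(p.1, pvMid p.1 p.2), (pvMid p.1 p.2, p.2)] else [p])

-- A's per-level midpoint list (with A's membership test)
def pvMids (selected : List Int) (ps : List (Int × Int)) : List Int :=
  ps.filterMap (fun p => if pvMid p.1 p.2 ∈ selected then none else some (pvMid p.1 p.2))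

-- the sorted list after inserting one level of midpoints
def pvIns : List Int → List Int
  | a :: b :: t => if b - a ≥ 2 then a :: pvMid a b :: pvIns (b :: t) else a :: pvIns (b :: t)
  | l => l

-- ---- B side ----
theorem pvBLoop_eq_stream (M : Int) (q : List (Int × Int)) (res : List Int) :
    pvBLoop M q res = res ++ pvTake (M - res.length) (pvStream q) := by
  fun_induction pvBLoop M q res with
  | case1 res => simp [pvStream, pvTake]
  | case2 lo hi rest res hlen hgap ih =>
    rw [ih]
    have hmid : PySem.Int.floordiv (lo + hi) 2 = pvMid lo hi := rfl
    rw [pvStream, if_pos hgap]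
    simp only [pvTake, List.length_append, List.length_cons, List.length_nil, hmid]
    have h1 : (M - ↑res.length).toNat = ((M - (↑res.length + 0 + 1)).toNat) + 1 := by
      omega
    rw [h1, List.take_succ_cons]
    simp [List.append_assoc]
  | case3 lo hi rest res hlen hgap ih =>
    rw [ih, pvStream, if_neg hgap]
  | case4 lo hi rest res hlen =>
    have : (M - (res.length : Int)).toNat = 0 := by omega
    simp [pvTake, this]

-- ---- stream structure ----
theorem pvStream_level_aux (q extra : List (Int × Int)) :
    pvStream (q ++ extra) = pvHeads q ++ pvStream (extra ++ pvKids q) := by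
  induction q generalizing extra with
  | nil => simp [pvHeads, pvKids]
  | cons p q' ih =>
    obtain ⟨lo, hi⟩ := p
    by_cases hg : hi - lo ≥ 2
    · rw [List.cons_append, pvStream, if_pos hg, List.append_assoc,
        ih (extra ++ [(lo, pvMid lo hi), (pvMid lo hi, hi)])]
      simp [pvHeads, pvKids, hg, List.append_assoc]
    · rw [List.cons_append, pvStream, if_neg hg, ih]
      simp [pvHeads, pvKids, hg]

theorem pvStream_level (q : List (Int × Int)) :
    pvStream q = pvHeads q ++ pvStream (pvKids q) := by
  have h := pvStream_level_aux q []
  simpa using h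

theorem pvStream_drop_nonsplit (q1 : List (Int × Int)) (p : Int × Int)
    (q2 : List (Int × Int)) (hp : ¬ p.2 - p.1 ≥ 2) :
    pvStream (q1 ++ p :: q2) = pvStream (q1 ++ q2) := by
  induction q1 generalizing q2 with
  | nil =>
    obtain ⟨a, b⟩ := p
    simpa [pvStream] using fun h => absurd h hp
  | cons x q1' ih =>
    obtain ⟨u, v⟩ := x
    by_cases hg : v - u ≥ 2
    · rw [List.cons_append, pvStream, if_pos hg, List.cons_append, pvStream, if_pos hg,
        List.append_assoc, List.append_assoc, List.cons_append]
      rw [ih (q2 ++ [(u, pvMid u v), (pvMid u v, v)])]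
    · rw [List.cons_append, pvStream, if_neg hg, List.cons_append, pvStream, if_neg hg, ih]

theorem pvStream_expand_aux (q acc : List (Int × Int)) :
    pvStream (acc ++ pvExpand q) = pvStream (acc ++ pvKids q) := by
  induction q generalizing acc with
  | nil => simp [pvExpand, pvKids]
  | cons p q' ih =>
    obtain ⟨lo, hi⟩ := p
    by_cases hg : hi - lo ≥ 2
    · have he : pvExpand ((lo, hi) :: q')
          = [(lo, pvMid lo hi), (pvMid lo hi, hi)] ++ pvExpand q' := by
        simp [pvExpand, hg]
      have hk : pvKids ((lo, hi) :: q')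
          = [(lo, pvMid lo hi), (pvMid lo hi, hi)] ++ pvKids q' := by
        simp [pvKids, hg]
      rw [he, hk, ← List.append_assoc, ← List.append_assoc,
        ih (acc ++ [(lo, pvMid lo hi), (pvMid lo hi, hi)])]
    · have he : pvExpand ((lo, hi) :: q') = (lo, hi) :: pvExpand q' := by
        simp [pvExpand, hg]
      have hk : pvKids ((lo, hi) :: q') = pvKids q' := by simp [pvKids, hg]
      rw [he, hk, pvStream_drop_nonsplit acc (lo, hi) (pvExpand q') hg, ih]

theorem pvStream_expand (q : List (Int × Int)) :
    pvStream (pvExpand q) = pvStream (pvKids q) := by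
  have h := pvStream_expand_aux q []
  simpa using h

-- ---- A side ----
theorem pvAInner_eq (selected : List Int) (M : Int) (ps : List (Int × Int)) (acc : List Int)
    (h : (selected.length : Int) + acc.length < M) :
    pvAInner selected M ps acc
      = acc ++ pvTake (M - selected.length - acc.length) (pvMids selected ps) := by
  induction ps generalizing acc with
  | nil => simp [pvAInner, pvMids, pvTake]
  | cons p rest ih =>
    obtain ⟨a, b⟩ := p
    by_cases hmem : pvMid a b ∈ selected
    · have hmids : pvMids selected ((a, b) :: rest) = pvMids selected rest := by
        simp [pvMids, hmem]
      rw [hmids, ← ih acc h]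
      simp only [pvAInner]
      rw [show PySem.Int.floordiv (a + b) 2 = pvMid a b from rfl, if_pos hmem,
        if_neg (by omega)]
    · have hmids : pvMids selected ((a, b) :: rest) = pvMid a b :: pvMids selected rest := by
        simp [pvMids, hmem]
      rw [hmids]
      simp only [pvAInner]
      rw [show PySem.Int.floordiv (a + b) 2 = pvMid a b from rfl, if_neg hmem]
      by_cases hcut : (selected.length : Int) + ((acc ++ [pvMid a b]).length : Int) ≥ M
      · rw [if_pos hcut]
        simp only [List.length_append, List.length_cons, List.length_nil] at hcut
        have h1 : (M - ↑selected.length - ↑acc.length).toNat = 1 := by omega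
        rw [pvTake, h1, List.take_succ_cons, List.take_zero]
      · rw [if_neg hcut]
        have hcut' : (selected.length : Int) + ((acc ++ [pvMid a b]).length : Int) < M := by
          omega
        rw [ih (acc ++ [pvMid a b]) hcut']
        simp only [List.length_append, List.length_cons, List.length_nil] at hcut ⊢
        have h1 : (M - ↑selected.length - ↑acc.length).toNat
            = ((M - ↑selected.length - (↑acc.length + 1)).toNat) + 1 := by omega
        rw [pvTake, pvTake, h1, List.take_succ_cons]
        push_cast
        simp [List.append_assoc]

theorem pv_zip_mem (s : List Int) (a b : Int) (hab : (a, b) ∈ s.zip s.tail) :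
    a ∈ s ∧ b ∈ s.tail := by
  have h := List.of_mem_zip hab
  exact h

theorem pv_consecutive (s : List Int) (hs : s.Pairwise (· ≤ ·)) (a b : Int)
    (hab : (a, b) ∈ s.zip s.tail) : (∀ x ∈ s, x ≤ a ∨ b ≤ x) ∧ a ≤ b := by
  induction s with
  | nil => simp at hab
  | cons u s' ih =>
    cases s' with
    | nil => simp at hab
    | cons v t =>
      simp only [List.tail_cons, List.zip_cons_cons, List.mem_cons] at hab
      rcases hab with heq | hmem
      · injection heq with ha hb
        subst ha; subst hb
        have hv : ∀ x ∈ b :: t, b ≤ x := by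
          intro x hx
          rcases List.mem_cons.mp hx with h1 | h1
          · omega
          · exact (List.pairwise_cons.mp (List.pairwise_cons.mp hs).2).1 x h1
        refine ⟨?_, (List.pairwise_cons.mp hs).1 b (by simp)⟩
        intro x hx
        rcases List.mem_cons.mp hx with h1 | h1
        · left; omega
        · right; exact hv x h1
      · have hs' : (v :: t).Pairwise (· ≤ ·) := (List.pairwise_cons.mp hs).2
        have ih' := ih hs' (by simpa using hmem)
        refine ⟨?_, ih'.2⟩
        intro x hx
        rcases List.mem_cons.mp hx with h1 | h1
        · subst h1
          left
          have ha : a ∈ v :: t := (pv_zip_mem _ _ _ (by simpa using hmem)).1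
          exact (List.pairwise_cons.mp hs).1 a ha
        · exact ih'.1 x h1

theorem pv_mid_mem (s : List Int) (hs : s.Pairwise (· ≤ ·)) (a b : Int)
    (hab : (a, b) ∈ s.zip s.tail) : pvMid a b ∈ s ↔ ¬ b - a ≥ 2 := by
  have hcons := pv_consecutive s hs a b hab
  have hle : a ≤ b := hcons.2
  have hmid : pvMid a b = (a + b) / 2 := PySem.Int.floordiv_eq_ediv_of_pos (by norm_num)
  constructor
  · intro hmem hgap
    have hlo : a < pvMid a b := by rw [hmid]; omega
    have hhi : pvMid a b < b := by rw [hmid]; omega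
    rcases hcons.1 _ hmem with h1 | h1 <;> omega
  · intro hgap
    have : pvMid a b = a := by rw [hmid]; omega
    rw [this]
    exact (pv_zip_mem _ _ _ hab).1

theorem pvMids_eq_heads (s : List Int) (hs : s.Pairwise (· ≤ ·)) :
    pvMids s (pvPairs s) = pvHeads (pvPairs s) := by
  unfold pvMids pvHeads
  apply List.filterMap_congr
  intro p hp
  obtain ⟨a, b⟩ := p
  have := pv_mid_mem s hs a b hp
  by_cases hg : b - a ≥ 2
  · simp only [hg, if_true]
    rw [if_neg (by tauto)]
  · simp only [hg, if_false]
    rw [if_pos (by tauto)]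

theorem pvIns_head (b : Int) (t : List Int) : ∃ r, pvIns (b :: t) = b :: r := by
  cases t with
  | nil => exact ⟨[], rfl⟩
  | cons c t' =>
    by_cases hg : c - b ≥ 2
    · exact ⟨_, by rw [pvIns, if_pos hg]⟩
    · exact ⟨_, by rw [pvIns, if_neg hg]⟩

theorem pvIns_sorted (s : List Int) (hs : s.Pairwise (· ≤ ·)) :
    (pvIns s).Pairwise (· ≤ ·) ∧ ∀ h, s.head? = some h → ∀ x ∈ pvIns s, h ≤ x := by
  induction s with
  | nil => simp [pvIns]
  | cons a s' ih =>
    cases s' with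
    | nil => simp [pvIns]
    | cons b t =>
      have hs' : (b :: t).Pairwise (· ≤ ·) := (List.pairwise_cons.mp hs).2
      have hab : a ≤ b := (List.pairwise_cons.mp hs).1 b (by simp)
      obtain ⟨hp, hmin⟩ := ih hs'
      have hminb : ∀ x ∈ pvIns (b :: t), b ≤ x := hmin b rfl
      have hmb : pvMid a b = (a + b) / 2 := PySem.Int.floordiv_eq_ediv_of_pos (by norm_num)
      by_cases hg : b - a ≥ 2
      · rw [pvIns, if_pos hg]
        constructor
        · refine List.pairwise_cons.mpr ⟨?_, List.pairwise_cons.mpr ⟨?_, hp⟩⟩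
          · intro x hx
            rcases List.mem_cons.mp hx with rfl | hx'
            · rw [hmb]; omega
            · have := hminb x hx'; omega
          · intro x hx; have := hminb x hx; rw [hmb]; omega
        · intro h hh x hx
          simp only [List.head?_cons, Option.some.injEq] at hh
          subst hh
          rcases List.mem_cons.mp hx with rfl | hx'
          · omega
          rcases List.mem_cons.mp hx' with rfl | hx''
          · rw [hmb]; omega
          · have := hminb x hx''; omega
      · rw [pvIns, if_neg hg]
        constructor
        · exact List.pairwise_cons.mpr ⟨fun x hx => by have := hminb x hx; omega, hp⟩
        · intro h hh x hx
          simp only [List.head?_cons, Option.some.injEq] at hh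
          subst hh
          rcases List.mem_cons.mp hx with rfl | hx'
          · omega
          · have := hminb x hx'; omega

theorem pvIns_perm (s : List Int) : (pvIns s).Perm (s ++ pvHeads (pvPairs s)) := by
  induction s with
  | nil => simp [pvIns, pvPairs, pvHeads]
  | cons a s' ih =>
    cases s' with
    | nil => simp [pvIns, pvPairs, pvHeads]
    | cons b t =>
      have hpp : pvPairs (a :: b :: t) = (a, b) :: pvPairs (b :: t) := by simp [pvPairs]
      by_cases hg : b - a ≥ 2
      · rw [pvIns, if_pos hg, hpp]
        have hh : pvHeads ((a, b) :: pvPairs (b :: t))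
            = pvMid a b :: pvHeads (pvPairs (b :: t)) := by simp [pvHeads, hg]
        rw [hh]
        refine List.Perm.cons a ?_
        exact (List.Perm.cons _ ih).trans List.perm_middle.symm
      · rw [pvIns, if_neg hg, hpp]
        have hh : pvHeads ((a, b) :: pvPairs (b :: t)) = pvHeads (pvPairs (b :: t)) := by
          simp [pvHeads, hg]
        rw [hh]
        exact List.Perm.cons a ih

theorem pvIns_eq_sort (s : List Int) (hs : s.Pairwise (· ≤ ·)) :
    pvSort (s ++ pvHeads (pvPairs s)) = pvIns s := by
  exact PySem.List.sorted_id_eq_of_perm_of_pairwise _ _ (pvIns_perm s) (pvIns_sorted s hs).1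

theorem pvPairs_ins (s : List Int) : pvPairs (pvIns s) = pvExpand (pvPairs s) := by
  induction s with
  | nil => simp [pvIns, pvPairs, pvExpand]
  | cons a s' ih =>
    cases s' with
    | nil => simp [pvIns, pvPairs, pvExpand]
    | cons b t =>
      obtain ⟨r, hr⟩ := pvIns_head b t
      by_cases hg : b - a ≥ 2
      · rw [pvIns, if_pos hg, hr]
        have h1 : pvPairs (a :: pvMid a b :: b :: r)
            = (a, pvMid a b) :: (pvMid a b, b) :: pvPairs (b :: r) := by simp [pvPairs]
        have h2 : pvPairs (b :: r) = pvPairs (pvIns (b :: t)) := by rw [hr]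
        rw [h1, h2, ih]
        simp [pvPairs, pvExpand, hg]
      · rw [pvIns, if_neg hg, hr]
        have h1 : pvPairs (a :: b :: r) = (a, b) :: pvPairs (b :: r) := by simp [pvPairs]
        have h2 : pvPairs (b :: r) = pvPairs (pvIns (b :: t)) := by rw [hr]
        rw [h1, h2, ih]
        simp [pvPairs, pvExpand, hg]

theorem pvHeads_nil_kids (q : List (Int × Int)) (h : pvHeads q = []) : pvKids q = [] := by
  induction q with
  | nil => rfl
  | cons p q' ih =>
    obtain ⟨a, b⟩ := p
    simp only [pvHeads, List.filterMap_cons] at h ih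
    simp only [pvKids, List.flatMap_cons] at ih ⊢
    by_cases hg : b - a ≥ 2
    · simp [hg] at h
    · simp only [hg, if_false] at h ⊢
      simp only [List.nil_append]
      exact ih h

-- main A-side lemma: the level loop computes the sorted seed-plus-stream-prefix
theorem pvALoop_eq (M : Int) (s : List Int) (hs : s.Pairwise (· ≤ ·)) :
    pvALoop M s = pvSort (s ++ pvTake (M - s.length) (pvStream (pvPairs s))) := by
  suffices H : ∀ (fuel : Nat) (s : List Int), (M - (s.length : Int)).toNat = fuel →
      s.Pairwise (· ≤ ·) →
      pvALoop M s = pvSort (s ++ pvTake (M - s.length) (pvStream (pvPairs s))) by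
    exact H _ s rfl hs
  intro fuel
  induction fuel using Nat.strong_induction_on with
  | _ fuel ih =>
  intro s hfuel hs
  rw [pvALoop.eq_def]
  by_cases h : (s.length : Int) < M
  · rw [dif_pos h]
    have hnew : pvAInner s M (s.zip s.tail) []
        = pvTake (M - s.length) (pvHeads (pvPairs s)) := by
      have h0 := pvAInner_eq s M (s.zip s.tail) [] (by simpa using h)
      rw [h0]
      rw [show s.zip s.tail = pvPairs s from rfl, pvMids_eq_heads s hs]
      simp [pvTake]
    by_cases hn : pvAInner s M (s.zip s.tail) [] = []
    · rw [dif_pos hn]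
      rw [hnew] at hn
      have hk1 : 1 ≤ (M - (s.length : Int)).toNat := by omega
      have hh : pvHeads (pvPairs s) = [] := by
        rcases List.take_eq_nil_iff.mp hn with h1 | h1
        · omega
        · exact h1
      have hstream : pvStream (pvPairs s) = [] := by
        rw [pvStream_level (pvPairs s), hh, pvHeads_nil_kids _ hh]
        simp [pvStream]
      rw [hstream]
      simp only [pvTake, List.take_nil, List.append_nil]
      exact (PySem.List.sorted_eq_self_of_pairwise s _ hs).symm
    · rw [dif_neg hn]
      have hnnil : pvTake (M - s.length) (pvHeads (pvPairs s)) ≠ [] := by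
        rw [← hnew]; exact hn
      by_cases hcut : (M - (s.length : Int)).toNat ≤ (pvHeads (pvPairs s)).length
      · -- cut-off inside this level: the sorted result already has M elements
        have hlen : ((PySem.List.sorted (s ++ pvAInner s M (s.zip s.tail) [])
            (fun x => x) false).length : Int) = M := by
          rw [PySem.List.length_sorted, List.length_append, hnew]
          simp only [pvTake, List.length_take]
          omega
        rw [ih 0 (by omega) _ (by omega)
          (by simpa using PySem.List.sorted_pairwise (s ++ pvAInner s M (s.zip s.tail) []) (fun x : Int => x))]
        have h0 : (M - ((PySem.List.sorted (s ++ pvAInner s M (s.zip s.tail) [])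
            (fun x => x) false).length : Int)).toNat = 0 := by omega
        have hnew' : pvAInner s M (s.zip s.tail) []
            = List.take (M - (s.length : Int)).toNat (pvHeads (pvPairs s)) := by
          simpa [pvTake] using hnew
        simp only [pvTake, h0, List.take_zero, List.append_nil, pvSort]
        rw [PySem.List.sorted_sorted, pvStream_level (pvPairs s),
          List.take_append_of_le_length hcut, ← hnew']
      · -- full level taken: recurse on the inserted, re-sorted list
        replace hcut : (pvHeads (pvPairs s)).length < (M - (s.length : Int)).toNat := by
          omega
        have hheads : pvTake (M - s.length) (pvHeads (pvPairs s)) = pvHeads (pvPairs s) := by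
          simp only [pvTake]
          exact List.take_of_length_le (le_of_lt hcut)
        have hsort : PySem.List.sorted (s ++ pvAInner s M (s.zip s.tail) [])
            (fun x => x) false = pvIns s := by
          rw [hnew, hheads]
          exact pvIns_eq_sort s hs
        have hhne : pvHeads (pvPairs s) ≠ [] := by
          rw [hnew, hheads] at hn; exact hn
        have hhlen : 1 ≤ (pvHeads (pvPairs s)).length := List.length_pos_iff.mpr hhne
        have hilen : (pvIns s).length = s.length + (pvHeads (pvPairs s)).length := by
          have := (pvIns_perm s).length_eq
          simpa [List.length_append] using this
        rw [hsort]
        rw [ih ((M - ((pvIns s).length : Int)).toNat) (by omega) _ rfl (pvIns_sorted s hs).1]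
        rw [pvPairs_ins s, pvStream_expand]
        rw [pvStream_level (pvPairs s)]
        have hidx : (M - (s.length : Int)).toNat - (pvHeads (pvPairs s)).length
            = (M - ((pvIns s).length : Int)).toNat := by omega
        have hrhs : List.take (M - (s.length : Int)).toNat
              (pvHeads (pvPairs s) ++ pvStream (pvKids (pvPairs s)))
            = pvHeads (pvPairs s)
              ++ List.take (M - ((pvIns s).length : Int)).toNat
                  (pvStream (pvKids (pvPairs s))) := by
          rw [List.take_append, List.take_of_length_le (le_of_lt hcut), hidx]
        simp only [pvTake]
        rw [hrhs, ← List.append_assoc]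
        simp only [pvSort]
        exact PySem.List.sorted_eq_sorted_of_perm _ _ _ (fun a b hab => hab)
          (List.Perm.append_right _ (pvIns_perm s))
  · rw [dif_neg h]
    have h0 : (M - (s.length : Int)).toNat = 0 := by omega
    simp only [pvTake, h0, List.take_zero, List.append_nil]
    exact (PySem.List.sorted_eq_self_of_pairwise s _ hs).symm

theorem pv_sort_0N_neg (N : Int) (hN : N < 0) :
    PySem.List.sorted ([0, N] : List Int) (fun x => x) false = [N, 0] :=
  PySem.List.sorted_id_eq_of_perm_of_pairwise _ _ (List.Perm.swap 0 N [])
    (by simp [List.pairwise_cons]; omega)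

theorem pv_slice_small (xs : List Int) (hlen : xs.length = 2) (M : Int)
    (hM : M = 0 ∨ M ≤ -2) : PySem.List.slice xs none (some M) = [] := by
  rcases hM with rfl | hM
  · rw [PySem.List.slice_to xs le_rfl]; simp
  · have hk : M = -(((-M).toNat : Nat) : Int) := by omega
    rw [hk, PySem.List.slice_to_neg_natCast xs (-M).toNat (by omega)]
    rw [List.take_eq_nil_iff]
    left
    omega

-- A = B on every input outside D_
theorem pv_AB (N M : Int) (hD : ¬ D_hierarchical_uniform_sampling N M) :
    hierarchical_uniform_sampling N M = hierarchical_uniform_sampling_alt N M := by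
  by_cases hM1 : M = 1
  · subst hM1
    simp [hierarchical_uniform_sampling, hierarchical_uniform_sampling_alt]
  unfold hierarchical_uniform_sampling hierarchical_uniform_sampling_alt
  simp only [if_neg hM1]
  by_cases hN : 0 ≤ N
  · have hq : (min 0 N, max 0 N) = ((0 : Int), N) := by
      rw [min_eq_left hN, max_eq_right hN]
    rw [hq, pvBLoop_eq_stream]
    congr 1
    rw [pvALoop_eq M [0, N]
      (List.pairwise_cons.mpr ⟨fun x hx => by simp at hx; omega, by simp⟩)]
    rfl
  · have hN' : N < 0 := by omega
    have hDm : ¬(M = 2 ∨ M = -1 ∨ (N = -1 ∧ 3 ≤ M)) := fun hc => hD ⟨hN', hc⟩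
    have hq : (min 0 N, max 0 N) = (N, (0 : Int)) := by
      rw [min_eq_right (le_of_lt hN'), max_eq_left (le_of_lt hN')]
    rw [hq, pvBLoop_eq_stream]
    by_cases hM3 : 3 ≤ M
    · have hN2 : N ≤ -2 := by
        by_contra hc
        exact hDm (Or.inr (Or.inr ⟨by omega, hM3⟩))
      congr 1
      have hmE : pvMid 0 N = (0 + N) / 2 := PySem.Int.floordiv_eq_ediv_of_pos (by norm_num)
      have hm1 : N < pvMid 0 N := by omega
      have hm2 : pvMid 0 N < 0 := by omega
      have hinner : pvAInner [0, N] M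
          (([0, N] : List Int).zip ([0, N] : List Int).tail) [] = [pvMid 0 N] := by
        show pvAInner [0, N] M [(0, N)] [] = [pvMid 0 N]
        simp only [pvAInner]
        rw [show PySem.Int.floordiv (0 + N) 2 = pvMid 0 N from rfl]
        rw [if_neg (show pvMid 0 N ∉ ([0, N] : List Int) by simp; omega)]
        split_ifs <;> rfl
      rw [pvALoop.eq_def]
      rw [dif_pos (show ((([0, N] : List Int).length : Int)) < M by simp; omega)]
      rw [dif_neg (by rw [hinner]; simp)]
      rw [hinner]
      have hsort1 : PySem.List.sorted ([0, N] ++ [pvMid 0 N]) (fun x => x) false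
          = [N, pvMid 0 N, 0] :=
        PySem.List.sorted_id_eq_of_perm_of_pairwise _ _
          (by simpa using List.perm_append_comm (l₁ := [N, pvMid 0 N]) (l₂ := [0]))
          (by simp [List.pairwise_cons]; omega)
      rw [hsort1, pvALoop_eq M [N, pvMid 0 N, 0]
        (by simp [List.pairwise_cons]; omega)]
      have hstream : pvStream [(N, (0 : Int))]
          = pvMid 0 N :: pvStream [(N, pvMid 0 N), (pvMid 0 N, 0)] := by
        rw [pvStream, if_pos (show (0 : Int) - N ≥ 2 by omega)]
        rw [show pvMid N 0 = pvMid 0 N from by unfold pvMid; rw [add_comm]]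
        simp
      rw [hstream]
      have htk : pvTake (M - (([0, N] : List Int).length : Int))
            (pvMid 0 N :: pvStream [(N, pvMid 0 N), (pvMid 0 N, 0)])
          = pvMid 0 N :: pvTake (M - 3) (pvStream [(N, pvMid 0 N), (pvMid 0 N, 0)]) := by
        simp only [pvTake, List.length_cons, List.length_nil]
        rw [show (M - ((0 : Nat) + 1 + 1 : Nat)).toNat = (M - 3).toNat + 1 from by omega,
          List.take_succ_cons]
      rw [htk]
      have happ : ([0, N] : List Int)
            ++ pvMid 0 N :: pvTake (M - 3) (pvStream [(N, pvMid 0 N), (pvMid 0 N, 0)])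
          = ([0, N, pvMid 0 N] : List Int)
            ++ pvTake (M - 3) (pvStream [(N, pvMid 0 N), (pvMid 0 N, 0)]) := by simp
      rw [happ]
      have hlen3 : (([N, pvMid 0 N, 0] : List Int).length : Int) = 3 := by simp
      rw [show pvPairs [N, pvMid 0 N, 0] = [(N, pvMid 0 N), (pvMid 0 N, 0)] from rfl, hlen3]
      simp only [pvSort]
      exact PySem.List.sorted_eq_sorted_of_perm _ _ _ (fun a b hab => hab)
        (List.Perm.append_right _
          (by simpa using List.perm_append_comm (l₁ := [N, pvMid 0 N]) (l₂ := [0])))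
    · have hM0 : M = 0 ∨ M ≤ -2 := by
        have h2 : M ≠ 2 := fun h => hDm (Or.inl h)
        have hm1' : M ≠ -1 := fun h => hDm (Or.inr (Or.inl h))
        omega
      rw [pvALoop.eq_def,
        dif_neg (show ¬((([0, N] : List Int).length : Int) < M) by simp; omega)]
      have ht0 : pvTake (M - (([0, N] : List Int).length : Int)) (pvStream [(N, (0 : Int))])
          = [] := by
        simp only [pvTake]
        rw [List.take_eq_nil_iff]
        left
        simp
        omega
      rw [ht0, List.append_nil]
      rw [pv_slice_small [0, N] rfl M hM0,
        pv_slice_small _ (by rw [PySem.List.length_sorted]; rfl) M hM0]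

-- ===== VERDICT (by name: the statement is the Claim_ definition above) =====
theorem hierarchical_uniform_sampling_spec : Claim_unchanged_hierarchical_uniform_sampling := by
  intro N M _ hD
  exact pv_AB N M hD

theorem hierarchical_uniform_sampling_changed : Claim_changed_hierarchical_uniform_sampling := by
  unfold Claim_changed_hierarchical_uniform_sampling
  refine ⟨by decide, by decide, ?_, ?_, by decide⟩
  · show hierarchical_uniform_sampling (-5) 2 = [0, -5]
    unfold hierarchical_uniform_sampling
    rw [if_neg (by norm_num), pvALoop.eq_def, dif_neg (by norm_num)]
    decide
  · show hierarchical_uniform_sampling_alt (-5) 2 = [-5, 0]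
    unfold hierarchical_uniform_sampling_alt
    rw [if_neg (by norm_num),
      show min 0 (-5 : Int) = -5 from by norm_num,
      show max 0 (-5 : Int) = 0 from by norm_num, pvBLoop.eq_def]
    decide

theorem hierarchical_uniform_sampling_tight : Claim_exact_hierarchical_uniform_sampling := by
  intro N M _ hD heq
  obtain ⟨hN, hc⟩ := hD
  have hq : (min 0 N, max 0 N) = (N, (0 : Int)) := by
    rw [min_eq_right (le_of_lt hN), max_eq_left (le_of_lt hN)]
  unfold hierarchical_uniform_sampling hierarchical_uniform_sampling_alt at heq
  rcases hc with rfl | hc2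
  · rw [if_neg (by norm_num), pvALoop.eq_def, dif_neg (by simp), hq, pvBLoop.eq_def] at heq
    simp only [show ¬((([0, N] : List Int).length : Int) < 2) by simp, if_false] at heq
    rw [pv_sort_0N_neg N hN] at heq
    rw [PySem.List.slice_to _ (by norm_num), PySem.List.slice_to _ (by norm_num)] at heq
    simp at heq
    omega
  rcases hc2 with rfl | ⟨rfl, hM3⟩
  · rw [if_neg (by norm_num), pvALoop.eq_def, dif_neg (by simp), hq, pvBLoop.eq_def] at heq
    simp only [show ¬((([0, N] : List Int).length : Int) < -1) from by norm_num,
      if_false] at heq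
    rw [pv_sort_0N_neg N hN] at heq
    rw [PySem.List.slice_to_neg_one, PySem.List.slice_to_neg_one] at heq
    simp at heq
    omega
  · have hinner : pvAInner [0, -1] M
        (([0, -1] : List Int).zip ([0, -1] : List Int).tail) [] = [] := by
      show pvAInner [0, -1] M [(0, -1)] [] = []
      simp only [pvAInner]
      rw [if_pos (by decide : PySem.Int.floordiv (0 + -1) 2 ∈ ([0, -1] : List Int))]
      rw [if_neg (show ¬((([0, -1] : List Int).length : Int)
          + (([] : List Int).length : Int) ≥ M) by simp; omega)]
    rw [if_neg (by omega), if_neg (by omega), pvALoop.eq_def,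
      dif_pos (show ((([0, -1] : List Int).length : Int)) < M by simp; omega),
      dif_pos hinner, hq, pvBLoop_eq_stream] at heq
    rw [show pvStream [((-1 : Int), (0 : Int))] = [] from by
        rw [pvStream, if_neg (by norm_num)]; simp [pvStream]] at heq
    simp only [pvTake, List.take_nil, List.append_nil] at heq
    rw [show PySem.List.sorted ([0, -1] : List Int) (fun x => x) false = [-1, 0] from by
        decide] at heq
    rw [PySem.List.slice_to _ (by omega), PySem.List.slice_to _ (by omega)] at heq
    rw [List.take_of_length_le (by simp; omega), List.take_of_length_le (by simp; omega)]
      at heq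
    simp at heq
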